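-- pv_equiv track=rewrite | github.com/TeacherGhostly/Grocery-Helper | grocery_helper/Grocery_helper.py | sanitise_command
-- ===== SOURCE A (Python) =====
-- def sanitise_command(command: str) -> str:
--     """
--     Return a command string to all lower-case and no leading or trailing white spaces removing
--     any numbers from the given command string.
--     Example:
--     >>> sanitise_command('add chocolate brownies')
--     'add chocolate brownies'
--     >>> sanitise_command('add c4hocolate Brownies')
--     'add chocolate brownies'
--     """
--     # make all characters in the command string lower case
--     command = command.lower()
--
--     # remove all leading or trailing white spaces, numbers or alpha characters from command string
--     command = command.strip()
--     new_command = ""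
--     for chara in command:
--         if chara.isalpha() or chara.isspace():
--             new_command += chara
--     new_command = " ".join(new_command.split())
--
--     return new_command
-- ===== SOURCE B (Python) =====
-- def sanitise_command(command: str) -> str:
--     # Split the lowercased string into whitespace-separated tokens first,
--     # then keep only the alphabetic characters of each token, dropping
--     # tokens that become empty.
--     words = []
--     for token in command.lower().split():
--         word = ''.join(c for c in token if c.isalpha())
--         if word:
--             words.append(word)
--     return ' '.join(words)
-- ===== Notes on version B (the rewrite author's own statement) =====
-- stated objective: alternative
-- what changed: B splits the lowercased string into whitespace tokens first and then filters each token to its alphabetic characters (dropping tokens that become empty), instead of A's character-by-character filter into one string followed by strip and a split/rejoin.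
import Mathlib
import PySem

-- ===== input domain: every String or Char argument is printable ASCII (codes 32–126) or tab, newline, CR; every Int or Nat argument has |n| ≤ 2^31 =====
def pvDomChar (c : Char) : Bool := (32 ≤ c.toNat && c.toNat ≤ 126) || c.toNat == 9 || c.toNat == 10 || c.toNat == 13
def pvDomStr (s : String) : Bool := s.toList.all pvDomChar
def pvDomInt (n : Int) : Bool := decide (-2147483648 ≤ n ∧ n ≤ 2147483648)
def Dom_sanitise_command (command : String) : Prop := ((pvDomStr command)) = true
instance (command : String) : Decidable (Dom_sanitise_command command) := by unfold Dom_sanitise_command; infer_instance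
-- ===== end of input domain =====

-- B restructures A (filter chars, then strip/split/rejoin) into split-first, then
-- per-token alphabetic filtering; same cost, different decomposition ("alternative").

-- ===== PORT A =====
-- A: lower, strip, keep alpha/space chars one by one into new_command, then " ".join(new_command.split())
def sanitise_command (command : String) : String :=
  let cmd := PySem.Chars.strip (PySem.Chars.lower command.toList)
  let new_command := cmd.foldl
    (fun acc c => if PySem.Chars.isalpha c || PySem.Chars.isspace c then acc ++ [c] else acc) []
  String.mk (PySem.Chars.join [' '] (PySem.Chars.split₀ new_command))

-- ===== PORT B =====
-- B: tokens of command.lower().split(); per token keep isalpha chars; append if non-empty; ' '.join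
def sanitise_command_alt (command : String) : String :=
  let toks := PySem.Chars.split₀ (PySem.Chars.lower command.toList)
  let words := toks.foldl
    (fun ws t =>
      let w := t.filter PySem.Chars.isalpha
      if w.isEmpty then ws else ws ++ [w]) []
  String.mk (PySem.Chars.join [' '] words)

-- ===== PRECONDITION & SPEC =====
def Spec_sanitise_command (command : String) (out : String) : Prop := out = sanitise_command_alt command
instance (command : String) (out : String) : Decidable (Spec_sanitise_command command out) := by unfold Spec_sanitise_command; infer_instance

-- ===== CLAIM (what is proved, stated in full; the proofs are below) =====
def Claim_equal_sanitise_command : Prop := ∀ (command : String), Dom_sanitise_command command → Spec_sanitise_command command (sanitise_command command)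

-- ===== LEMMAS AND PROOFS =====

-- non-space predicate (split₀ splits on runs of whitespace)
def pvNS (c : Char) : Bool := !(PySem.Chars.isspace c)
-- characters A's loop keeps
def pvKeep (c : Char) : Bool := PySem.Chars.isalpha c || PySem.Chars.isspace c

-- reference recursion for str.split(): skip spaces, peel one maximal non-space run
def pvWords : List Char → List (List Char)
  | [] => []
  | c :: cs =>
    if PySem.Chars.isspace c then pvWords cs
    else (c :: cs.takeWhile pvNS) :: pvWords (cs.dropWhile pvNS)
termination_by cs => cs.length
decreasing_by
  · simp
  · have := List.length_dropWhile_le pvNS cs; simp; omega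

lemma pv_space_not_alpha (c : Char) (h : PySem.Chars.isspace c = true) :
    PySem.Chars.isalpha c = false := by
  simp only [PySem.Chars.isspace, PySem.Chars.isalpha, PySem.Chars.isupper, PySem.Chars.islower,
    Char.le_def, UInt32.le_iff_toNat_le, Bool.or_eq_true, Bool.and_eq_true, decide_eq_true_eq,
    Bool.or_eq_false_iff, Bool.and_eq_false_iff, decide_eq_false_iff_not, not_le] at *
  have h1 : c.toNat = c.val.toNat := rfl
  have h2 : ('A').val.toNat = 65 := rfl
  have h3 : ('Z').val.toNat = 90 := rfl
  have h4 : ('a').val.toNat = 97 := rfl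
  have h5 : ('z').val.toNat = 122 := rfl
  omega

lemma pv_go_spec (cs : List Char) : ∀ cur acc,
    PySem.Chars.split₀.go cs cur acc =
      acc.reverse ++ (if cur.isEmpty then pvWords cs
        else (cur.reverse ++ cs.takeWhile pvNS) :: pvWords (cs.dropWhile pvNS)) := by
  induction cs with
  | nil =>
    intro cur acc
    rw [show PySem.Chars.split₀.go [] cur acc
        = (if cur.isEmpty then acc.reverse else (cur.reverse :: acc).reverse) from rfl]
    by_cases hc : cur.isEmpty <;> simp [hc, pvWords]
  | cons c cs ih =>
    intro cur acc
    rw [show PySem.Chars.split₀.go (c :: cs) cur acc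
        = (if PySem.Chars.isspace c then
            (if cur.isEmpty then PySem.Chars.split₀.go cs [] acc
             else PySem.Chars.split₀.go cs [] (cur.reverse :: acc))
           else PySem.Chars.split₀.go cs (c :: cur) acc) from rfl]
    by_cases hs : PySem.Chars.isspace c
    · by_cases hc : cur.isEmpty
      · rw [if_pos hs, if_pos hc, ih, if_pos hc, pvWords]
        simp [hs, hc]
      · rw [if_pos hs, if_neg hc, ih, if_neg hc]
        simp [List.takeWhile_cons, List.dropWhile_cons, pvNS, hs, pvWords]
    · rw [if_neg hs, ih]
      simp only [List.isEmpty_cons, if_neg, Bool.false_eq_true, not_false_eq_true, if_false]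
      by_cases hc : cur.isEmpty
      · simp [hc, List.isEmpty_iff.mp hc, pvWords, hs]
      · simp [hc, List.takeWhile_cons, List.dropWhile_cons, pvNS, hs, pvWords]

lemma pv_split₀_eq_words (cs : List Char) : PySem.Chars.split₀ cs = pvWords cs := by
  rw [show PySem.Chars.split₀ cs = PySem.Chars.split₀.go cs [] [] from rfl, pv_go_spec]
  simp

lemma pv_takeWhile_filter (cs : List Char) :
    (cs.filter pvKeep).takeWhile pvNS = (cs.takeWhile pvNS).filter PySem.Chars.isalpha := by
  induction cs with
  | nil => simp
  | cons d t ih =>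
    by_cases hs : PySem.Chars.isspace d
    · have ha := pv_space_not_alpha d hs
      simp [List.filter_cons, List.takeWhile_cons, pvKeep, pvNS, hs, ha]
    · by_cases ha : PySem.Chars.isalpha d
      · simp [List.filter_cons, List.takeWhile_cons, pvKeep, pvNS, hs, ha, ih]
      · simp [List.filter_cons, List.takeWhile_cons, pvKeep, pvNS, hs, ha, ih]

lemma pv_dropWhile_filter (cs : List Char) :
    (cs.filter pvKeep).dropWhile pvNS = (cs.dropWhile pvNS).filter pvKeep := by
  induction cs with
  | nil => simp
  | cons d t ih =>
    by_cases hs : PySem.Chars.isspace d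
    · simp [List.filter_cons, List.dropWhile_cons, pvKeep, pvNS, hs]
    · by_cases ha : PySem.Chars.isalpha d
      · simp [List.filter_cons, List.dropWhile_cons, pvKeep, pvNS, hs, ha, ih]
      · simp [List.filter_cons, List.dropWhile_cons, pvKeep, pvNS, hs, ha, ih]

-- prepending a character that is neither alphabetic nor a space does not change the
-- cleaned word list
lemma pv_words_junk_cons (c : Char) (cs : List Char)
    (ha : PySem.Chars.isalpha c = false) (hs : PySem.Chars.isspace c = false) :
    ((pvWords (c :: cs)).map (·.filter PySem.Chars.isalpha)).filter (fun w => !w.isEmpty) =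
      ((pvWords cs).map (·.filter PySem.Chars.isalpha)).filter (fun w => !w.isEmpty) := by
  rw [show pvWords (c :: cs) = (c :: cs.takeWhile pvNS) :: pvWords (cs.dropWhile pvNS) from by
    simp [pvWords, hs]]
  cases cs with
  | nil => simp [pvWords, ha]
  | cons d t =>
    by_cases hd : PySem.Chars.isspace d
    · simp [List.takeWhile_cons, List.dropWhile_cons, pvNS, hd, ha, List.filter_cons]
    · simp [pvWords, List.takeWhile_cons, List.dropWhile_cons, pvNS, hd, ha, List.filter_cons]

-- main structural fact: filtering chars then splitting = splitting then filtering tokens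
lemma pv_words_filter (cs : List Char) :
    pvWords (cs.filter pvKeep) =
      ((pvWords cs).map (·.filter PySem.Chars.isalpha)).filter (fun w => !w.isEmpty) := by
  suffices H : ∀ n (cs : List Char), cs.length ≤ n →
      pvWords (cs.filter pvKeep) =
        ((pvWords cs).map (·.filter PySem.Chars.isalpha)).filter (fun w => !w.isEmpty) from
    H cs.length cs le_rfl
  intro n
  induction n with
  | zero =>
    intro cs h
    have : cs = [] := by cases cs <;> simp_all
    simp [this, pvWords]
  | succ n ih =>
    intro cs h
    cases cs with
    | nil => simp [pvWords]
    | cons c t =>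
      by_cases hs : PySem.Chars.isspace c
      · have hk : pvKeep c = true := by simp [pvKeep, hs]
        rw [List.filter_cons, if_pos hk]
        rw [show pvWords (c :: t.filter pvKeep) = pvWords (t.filter pvKeep) from by
          simp [pvWords, hs]]
        rw [show pvWords (c :: t) = pvWords t from by simp [pvWords, hs]]
        exact ih t (by simp at h; omega)
      · by_cases ha : PySem.Chars.isalpha c
        · have hk : pvKeep c = true := by simp [pvKeep, ha]
          rw [List.filter_cons, if_pos hk]
          rw [show pvWords (c :: t.filter pvKeep)
              = (c :: (t.filter pvKeep).takeWhile pvNS) ::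
                  pvWords ((t.filter pvKeep).dropWhile pvNS) from by simp [pvWords, hs]]
          rw [pv_takeWhile_filter, pv_dropWhile_filter,
            ih (t.dropWhile pvNS) (le_trans (List.length_dropWhile_le _ _) (by simp at h; omega)),
            show pvWords (c :: t) = (c :: t.takeWhile pvNS) :: pvWords (t.dropWhile pvNS) from by
              simp [pvWords, hs]]
          simp [List.map_cons, List.filter_cons, ha]
        · have hk : pvKeep c = false := by simp [pvKeep, ha, hs]
          rw [List.filter_cons, if_neg (by simp [hk]),
            ih t (by simp at h; omega), ← pv_words_junk_cons c t (by simpa using ha) (by simpa using hs)]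

lemma pv_words_allspace (t : List Char) (h : ∀ c ∈ t, PySem.Chars.isspace c = true) :
    pvWords t = [] := by
  induction t with
  | nil => simp [pvWords]
  | cons c u ih =>
    rw [show pvWords (c :: u) = pvWords u from by simp [pvWords, h c (by simp)]]
    exact ih fun d hd => h d (by simp [hd])

lemma pv_words_append_space (s t : List Char) (h : ∀ c ∈ t, PySem.Chars.isspace c = true) :
    pvWords (s ++ t) = pvWords s := by
  suffices H : ∀ n (s : List Char), s.length ≤ n → pvWords (s ++ t) = pvWords s from
    H s.length s le_rfl
  intro n
  induction n with
  | zero =>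
    intro s hl
    have : s = [] := by cases s <;> simp_all
    simp [this, pv_words_allspace t h, pvWords]
  | succ n ih =>
    intro s hl
    cases s with
    | nil => simp [pv_words_allspace t h, pvWords]
    | cons c s' =>
      by_cases hs : PySem.Chars.isspace c
      · rw [List.cons_append,
          show pvWords (c :: (s' ++ t)) = pvWords (s' ++ t) from by simp [pvWords, hs],
          show pvWords (c :: s') = pvWords s' from by simp [pvWords, hs]]
        exact ih s' (by simp at hl; omega)
      · rw [List.cons_append,
          show pvWords (c :: (s' ++ t))
            = (c :: (s' ++ t).takeWhile pvNS) :: pvWords ((s' ++ t).dropWhile pvNS) from by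
              simp [pvWords, hs],
          show pvWords (c :: s')
            = (c :: s'.takeWhile pvNS) :: pvWords (s'.dropWhile pvNS) from by
              simp [pvWords, hs],
          List.takeWhile_append, List.dropWhile_append]
        by_cases hall : ∀ x ∈ s', pvNS x = true
        · have h1 : s'.takeWhile pvNS = s' := List.takeWhile_eq_self_iff.mpr hall
          have h2 : s'.dropWhile pvNS = [] := List.dropWhile_eq_nil_iff.mpr hall
          have h3 : t.takeWhile pvNS = [] := by
            cases t with
            | nil => simp
            | cons d u => simp [List.takeWhile_cons, pvNS, h d (by simp)]
          have h4 : t.dropWhile pvNS = t := by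
            cases t with
            | nil => simp
            | cons d u => simp [List.dropWhile_cons, pvNS, h d (by simp)]
          simp [h1, h2, h3, h4, pv_words_allspace t h, pvWords]
        · have h1 : (s'.takeWhile pvNS).length ≠ s'.length := by
            intro e
            exact hall (List.takeWhile_eq_self_iff.mp
              ((List.takeWhile_prefix (l := s') (p := pvNS)).eq_of_length e))
          have h2 : ¬ ((s'.dropWhile pvNS).isEmpty = true) := by
            simp only [List.isEmpty_iff, List.dropWhile_eq_nil_iff]
            exact hall
          rw [if_neg h1, if_neg h2,
            ih (s'.dropWhile pvNS)
              (le_trans (List.length_dropWhile_le _ _) (by simp at hl; omega))]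

lemma pv_words_lstrip (y : List Char) :
    pvWords (List.dropWhile PySem.Chars.isspace y) = pvWords y := by
  induction y with
  | nil => simp
  | cons c t ih =>
    by_cases hs : PySem.Chars.isspace c
    · rw [List.dropWhile_cons, if_pos hs, ih,
        show pvWords (c :: t) = pvWords t from by simp [pvWords, hs]]
    · rw [List.dropWhile_cons, if_neg hs]

lemma pv_words_rstrip (y : List Char) :
    pvWords (PySem.Chars.rstrip y) = pvWords y := by
  have hdecomp : y = PySem.Chars.rstrip y ++ (y.reverse.takeWhile PySem.Chars.isspace).reverse := by
    rw [PySem.Chars.rstrip]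
    rw [← List.reverse_append, ← List.takeWhile_append_dropWhile (p := PySem.Chars.isspace) (l := y.reverse)]
    simp
  conv_rhs => rw [hdecomp]
  rw [pv_words_append_space]
  intro c hc
  exact List.mem_takeWhile_imp (by simpa using hc)

lemma pv_words_strip (y : List Char) : pvWords (PySem.Chars.strip y) = pvWords y := by
  rw [PySem.Chars.strip, pv_words_rstrip, PySem.Chars.lstrip, pv_words_lstrip]

lemma pv_foldl_words (toks : List (List Char)) (init : List (List Char)) :
    toks.foldl (fun ws t =>
        let w := t.filter PySem.Chars.isalpha
        if w.isEmpty then ws else ws ++ [w]) init =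
      init ++ (toks.map (·.filter PySem.Chars.isalpha)).filter (fun w => !w.isEmpty) := by
  induction toks generalizing init with
  | nil => simp
  | cons t ts ih =>
    rw [List.foldl_cons,
      show (let w := List.filter PySem.Chars.isalpha t;
            if w.isEmpty = true then init else init ++ [w])
          = (if (List.filter PySem.Chars.isalpha t).isEmpty = true then init
             else init ++ [List.filter PySem.Chars.isalpha t]) from rfl,
      List.map_cons, List.filter_cons]
    by_cases h : (t.filter PySem.Chars.isalpha).isEmpty
    · rw [if_pos h, ih]
      simp [h]
    · rw [if_neg h, ih]
      simp [h]

-- ===== VERDICT (by name: the statement is the Claim_ definition above) =====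
theorem sanitise_command_spec : Claim_equal_sanitise_command := by
  intro command _
  unfold Spec_sanitise_command sanitise_command sanitise_command_alt
  dsimp only
  rw [show (fun acc (c : Char) => if PySem.Chars.isalpha c || PySem.Chars.isspace c then acc ++ [c] else acc)
      = (fun (acc : List Char) c => if pvKeep c = true then acc ++ [id c] else acc) from rfl]
  rw [PySem.List.foldl_append_if pvKeep id, pv_foldl_words, List.map_id, List.nil_append,
    pv_split₀_eq_words, pv_split₀_eq_words, pv_words_filter, pv_words_strip]
  simp
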